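-- pv_equiv track=rewrite | github.com/FujitsuResearch/LSPWD | utils/periodic_detection_helper.py | find_longest_repeated_ends
-- ===== SOURCE A (Python) =====
-- def find_longest_repeated_ends(strings):
--     """
--     Find the longest prefix and suffix that are identical across all strings.
--
--     Args:
--     strings (list): List of strings to check.
--
--     Returns:
--     int: Length of the longest common prefix and suffix.
--     """
--     if not strings:
--         return 0
--
--     # Use the first string as a reference
--     s = strings[0]
--     n = len(s)
--     max_len = 0
--
--     # Iterate over possible prefix/suffix lengths
--     for i in range(1, n // 2 + 1):
--         prefix = s[:i]
--         suffix = s[-i:]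
--
--         # Check if prefix equals suffix and appears in all strings
--         if prefix == suffix and all(st.startswith(prefix) and st.endswith(suffix) for st in strings):
--             max_len = i
--
--     return max_len
-- ===== SOURCE B (Python) =====
-- def _ncp(a, b):
--     """Length of the longest common prefix of a and b."""
--     k = 0
--     m = min(len(a), len(b))
--     while k < m and a[k] == b[k]:
--         k += 1
--     return k
--
--
-- def find_longest_repeated_ends(strings):
--     if not strings:
--         return 0
--     s = strings[0]
--     r = s[::-1]
--     # largest i that could qualify: bounded by n//2, by the common
--     # prefix of every string with s, and by the common suffix of every string with s
--     bound = len(s) // 2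
--     for st in strings:
--         bound = min(bound, min(_ncp(s, st), _ncp(r, st[::-1])))
--     # walk down from the bound: first i whose prefix equals its suffix wins
--     i = bound
--     while i > 0 and s[:i] != s[-i:]:
--         i -= 1
--     return i
-- ===== Notes on version B (the rewrite author's own statement) =====
-- stated objective: alternative
-- what changed: Instead of testing, for every candidate length i, the prefix/suffix of every string, B precomputes in one pass the minimum common prefix/suffix length of every string with strings[0] (suffixes via a reversed-string prefix scan), takes bound = min(n//2, those minima), and walks DOWN from bound returning the first i with s[:i] == s[-i:]; it trades A's per-candidate all-strings scan for per-character Python loops, so it is not measurably faster in CPython.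
import Mathlib
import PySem

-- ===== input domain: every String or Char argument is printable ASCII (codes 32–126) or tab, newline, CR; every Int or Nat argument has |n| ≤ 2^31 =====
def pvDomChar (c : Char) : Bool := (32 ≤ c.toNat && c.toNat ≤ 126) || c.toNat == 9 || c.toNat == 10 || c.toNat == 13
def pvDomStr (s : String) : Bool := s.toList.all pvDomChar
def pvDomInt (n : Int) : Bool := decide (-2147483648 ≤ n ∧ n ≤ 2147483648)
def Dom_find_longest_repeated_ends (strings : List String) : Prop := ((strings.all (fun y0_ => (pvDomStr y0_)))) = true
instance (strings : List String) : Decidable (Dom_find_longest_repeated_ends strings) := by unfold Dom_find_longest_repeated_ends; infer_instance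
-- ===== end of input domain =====

-- B replaces A's per-candidate-length scan of all strings by a one-pass common-prefix/common-suffix
-- bound followed by a downward search for a matching prefix/suffix of strings[0] (objective: alternative algorithm).

-- ===== PORT A =====
def find_longest_repeated_ends (strings : List String) : Int :=
  match strings with
  | [] => 0
  | s :: rest =>
    let n : Int := PySem.Str.len s
    (PySem.List.pyRange 1 (PySem.Int.floordiv n 2 + 1) 1).foldl
      (fun max_len i =>
        let pre := PySem.Str.slice s none (some i)
        let suf := PySem.Str.slice s (some (-i)) none
        if pre = suf ∧ (s :: rest).all
            (fun st => PySem.Str.startswith st pre && PySem.Str.endswith st suf)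
        then i else max_len) 0

-- ===== PORT B =====
-- helper _ncp of Source B: length of the longest common prefix (while loop → structural recursion)
def pvNcp : List Char → List Char → Nat
  | a :: as, b :: bs => if a = b then pvNcp as bs + 1 else 0
  | _, _ => 0

-- the downward while loop of Source B: first i ≤ j with s[:i] == s[-i:] (0 if none)
def pvBorderDown (s : List Char) : Nat → Nat
  | 0 => 0
  | i + 1 =>
    if PySem.List.slice s none (some ((i : Int) + 1)) =
       PySem.List.slice s (some (-((i : Int) + 1))) none
    then i + 1 else pvBorderDown s i

def find_longest_repeated_ends_alt (strings : List String) : Int :=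
  match strings with
  | [] => 0
  | s :: rest =>
    let sl := s.toList
    let r := sl.reverse
    let bound := (s :: rest).foldl
      (fun b st => min b (min (pvNcp sl st.toList) (pvNcp r st.toList.reverse)))
      (sl.length / 2)
    ((pvBorderDown sl bound : Nat) : Int)

-- ===== PRECONDITION & SPEC =====
def Spec_find_longest_repeated_ends (strings : List String) (out : Int) : Prop := out = find_longest_repeated_ends_alt strings
instance (strings : List String) (out : Int) : Decidable (Spec_find_longest_repeated_ends strings out) := by unfold Spec_find_longest_repeated_ends; infer_instance

-- ===== CLAIM (what is proved, stated in full; the proofs are below) =====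
def Claim_equal_find_longest_repeated_ends : Prop := ∀ (strings : List String), Dom_find_longest_repeated_ends strings → Spec_find_longest_repeated_ends strings (find_longest_repeated_ends strings)

-- ===== LEMMAS AND PROOFS =====

-- generic downward search: first i ≤ j satisfying P, 0 if none
def pvDown (P : Nat → Prop) [DecidablePred P] : Nat → Nat
  | 0 => 0
  | i + 1 => if P (i + 1) then i + 1 else pvDown P i

-- A's ascending "keep the last satisfying i" fold equals the downward search
theorem pv_fold_eq_down (P : Int → Prop) [DecidablePred P] (m : Nat) :
    (PySem.List.pyRange 1 ((m : Int) + 1) 1).foldl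
      (fun acc i => if P i then i else acc) 0
    = ((pvDown (fun k => P (k : Int)) m : Nat) : Int) := by
  induction m with
  | zero => rw [PySem.List.pyRange_one_eq_nil (by omega)]; rfl
  | succ m ih =>
    have h1 : ((m + 1 : Nat) : Int) + 1 = ((m : Int) + 1) + 1 := by push_cast; ring
    have h2 : (((m + 1 : Nat)) : Int) = (m : Int) + 1 := by push_cast; ring
    rw [h1, PySem.List.pyRange_one_succ_right (by omega), List.foldl_append, ih]
    simp only [List.foldl_cons, List.foldl_nil, pvDown]
    by_cases h : P ((m : Int) + 1)
    · rw [if_pos h, if_pos (by rwa [h2]), h2]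
    · rw [if_neg h, if_neg (by rwa [h2])]

theorem pvDown_congr (P Q : Nat → Prop) [DecidablePred P] [DecidablePred Q] (j : Nat)
    (h : ∀ i, 1 ≤ i → i ≤ j → (P i ↔ Q i)) : pvDown P j = pvDown Q j := by
  induction j with
  | zero => rfl
  | succ j ih =>
    simp only [pvDown]
    rw [if_congr (h (j + 1) (by omega) le_rfl) rfl
        (ih (fun i h1 h2 => h i h1 (by omega)))]

theorem pvDown_drop (P : Nat → Prop) [DecidablePred P] (m b : Nat) (hb : b ≤ m)
    (h : ∀ i, b < i → i ≤ m → ¬ P i) : pvDown P m = pvDown P b := by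
  induction m with
  | zero => have hb0 : b = 0 := by omega
            subst hb0; rfl
  | succ m ih =>
    rcases Nat.lt_or_ge b (m + 1) with hlt | hge
    · have hnp : ¬ P (m + 1) := h (m + 1) hlt le_rfl
      simp only [pvDown, if_neg hnp]
      exact ih (by omega) (fun i h1 h2 => h i h1 (by omega))
    · have hbe : b = m + 1 := by omega
      subst hbe; rfl

theorem pvBorderDown_eq (s : List Char) (j : Nat) :
    pvBorderDown s j = pvDown (fun i => s.take i = s.drop (s.length - i)) j := by
  induction j with
  | zero => rfl
  | succ j ih =>
    have hc : ((j : Int) + 1) = ((j + 1 : Nat) : Int) := by push_cast; ring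
    simp only [pvBorderDown, pvDown]
    rw [hc, PySem.List.slice_to_natCast, PySem.List.slice_from_neg_natCast s (j + 1) (by omega), ih]

theorem pvNcp_prefix_iff : ∀ (a b : List Char) (i : Nat), i ≤ a.length →
    (a.take i <+: b ↔ i ≤ pvNcp a b)
  | _, b, 0, _ => by simp
  | x :: as, y :: bs, i + 1, hi => by
    simp only [List.take_succ_cons, List.cons_prefix_cons, pvNcp]
    constructor
    · rintro ⟨rfl, hp⟩
      rw [if_pos rfl]
      have := (pvNcp_prefix_iff as bs i (by simpa using hi)).mp hp
      omega
    · intro h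
      by_cases hxy : x = y
      · rw [if_pos hxy] at h
        exact ⟨hxy, (pvNcp_prefix_iff as bs i (by simpa using hi)).mpr (by omega)⟩
      · rw [if_neg hxy] at h; omega
  | x :: as, [], i + 1, hi => by
    simp [pvNcp, List.take_succ_cons]
  | [], b, i + 1, hi => by simp at hi

theorem pvNcp_suffix_iff (a b : List Char) (i : Nat) (hi : i ≤ a.length) :
    a.drop (a.length - i) <:+ b ↔ i ≤ pvNcp a.reverse b.reverse := by
  rw [← List.reverse_prefix]
  have hrev : (a.drop (a.length - i)).reverse = a.reverse.take i := by
    rw [List.reverse_drop]; congr 1; omega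
  rw [hrev]
  exact pvNcp_prefix_iff a.reverse b.reverse i (by simpa using hi)

theorem pv_le_foldl_min_iff (l : List String) (g : String → Nat) (init c : Nat) :
    c ≤ l.foldl (fun b st => min b (g st)) init ↔ c ≤ init ∧ ∀ st ∈ l, c ≤ g st := by
  induction l generalizing init with
  | nil => simp
  | cons x xs ih =>
    simp only [List.foldl_cons, ih, List.mem_cons]
    constructor
    · rintro ⟨h1, h2⟩
      exact ⟨(le_min_iff.mp h1).1, fun st hst => by
        rcases hst with rfl | hst
        · exact (le_min_iff.mp h1).2
        · exact h2 st hst⟩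
    · rintro ⟨h1, h2⟩
      exact ⟨le_min_iff.mpr ⟨h1, h2 x (Or.inl rfl)⟩, fun st hst => h2 st (Or.inr hst)⟩

-- ===== VERDICT (by name: the statement is the Claim_ definition above) =====
theorem find_longest_repeated_ends_spec : Claim_equal_find_longest_repeated_ends := by
  intro strings _
  unfold Spec_find_longest_repeated_ends
  match strings with
  | [] => rfl
  | s :: rest =>
    simp only [find_longest_repeated_ends, find_longest_repeated_ends_alt]
    rw [show (2:Int) = ((2:Nat):Int) from rfl,
        show PySem.Str.len s = ((s.toList.length : Nat) : Int) from by simp,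
        PySem.Int.floordiv_natCast,
        pv_fold_eq_down (fun i : Int =>
          PySem.Str.slice s none (some i) = PySem.Str.slice s (some (-i)) none ∧
          ((s :: rest).all fun st =>
            PySem.Str.startswith st (PySem.Str.slice s none (some i)) &&
            PySem.Str.endswith st (PySem.Str.slice s (some (-i)) none)) = true)
          (s.toList.length / 2)]
    congr 1
    -- abbreviations
    set sl := s.toList with hsl
    set r := sl.reverse with hr
    set bound := (s :: rest).foldl
      (fun b st => min b (min (pvNcp sl st.toList) (pvNcp r st.toList.reverse)))
      (sl.length / 2) with hbd
    have hble : bound ≤ sl.length / 2 := ((pv_le_foldl_min_iff _ _ _ _).mp (le_refl bound)).1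
    -- per-string condition ↔ the two pvNcp bounds
    have hstep : ∀ (i : Nat), 1 ≤ i → i ≤ sl.length →
        ∀ st : String,
        ((PySem.Str.startswith st (PySem.Str.slice s none (some (i:Int))) &&
          PySem.Str.endswith st (PySem.Str.slice s (some (-(i:Int))) none)) = true
         ↔ (i ≤ pvNcp sl st.toList ∧ i ≤ pvNcp r st.toList.reverse)) := by
      intro i h1 hin st
      have hpre : (PySem.Str.slice s none (some (i:Int))).toList = sl.take i := by
        rw [PySem.Str.toList_slice, PySem.Chars.slice_eq_listSlice, PySem.List.slice_to_natCast]
      have hsuf : (PySem.Str.slice s (some (-(i:Int))) none).toList = sl.drop (sl.length - i) := by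
        rw [PySem.Str.toList_slice, PySem.Chars.slice_eq_listSlice,
            PySem.List.slice_from_neg_natCast sl i h1]
      rw [Bool.and_eq_true, PySem.Str.startswith_eq, PySem.Str.endswith_eq, hpre, hsuf,
          PySem.Chars.startswith_iff, PySem.Chars.endswith_iff,
          pvNcp_prefix_iff sl st.toList i hin, pvNcp_suffix_iff sl st.toList i hin]
    -- the central predicate equivalence
    have hPQ : ∀ i, 1 ≤ i → i ≤ sl.length / 2 →
        ((PySem.Str.slice s none (some (i:Int)) = PySem.Str.slice s (some (-(i:Int))) none ∧
          ((s :: rest).all fun st =>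
            PySem.Str.startswith st (PySem.Str.slice s none (some (i:Int))) &&
            PySem.Str.endswith st (PySem.Str.slice s (some (-(i:Int))) none)) = true)
         ↔ ((sl.take i = sl.drop (sl.length - i)) ∧ i ≤ bound)) := by
      intro i h1 h2
      have hin : i ≤ sl.length := le_trans h2 (Nat.div_le_self _ _)
      have hpre : (PySem.Str.slice s none (some (i:Int))).toList = sl.take i := by
        rw [PySem.Str.toList_slice, PySem.Chars.slice_eq_listSlice, PySem.List.slice_to_natCast]
      have hsuf : (PySem.Str.slice s (some (-(i:Int))) none).toList = sl.drop (sl.length - i) := by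
        rw [PySem.Str.toList_slice, PySem.Chars.slice_eq_listSlice,
            PySem.List.slice_from_neg_natCast sl i h1]
      constructor
      · rintro ⟨hQs, hall⟩
        refine ⟨?_, ?_⟩
        · have := congrArg String.toList hQs
          rwa [hpre, hsuf] at this
        · rw [hbd, pv_le_foldl_min_iff]
          refine ⟨h2, fun st hst => le_min_iff.mpr ?_⟩
          exact (hstep i h1 hin st).mp ((List.all_eq_true.mp hall) st hst)
      · rintro ⟨hQ, hb⟩
        rw [hbd, pv_le_foldl_min_iff] at hb
        refine ⟨?_, ?_⟩
        · apply String.toList_inj.mp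
          rw [hpre, hsuf]; exact hQ
        · exact List.all_eq_true.mpr (fun st hst =>
            (hstep i h1 hin st).mpr (le_min_iff.mp (hb.2 st hst)))
    rw [pvDown_congr _ _ _ hPQ,
        pvDown_drop _ _ bound hble (fun i hbi _ h => absurd h.2 (by omega)),
        pvDown_congr (fun i => sl.take i = sl.drop (sl.length - i) ∧ i ≤ bound)
          (fun i => sl.take i = sl.drop (sl.length - i)) bound
          (fun i _ h2 => ⟨fun h => h.1, fun h => ⟨h, h2⟩⟩),
        ← pvBorderDown_eq]
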